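-- pv_equiv track=rewrite | github.com/zslane/pymultics | multics/filesystem/sss/iox_.py | _filter_line_endings
-- ===== SOURCE A (Python) =====
-- LF = chr(10)
--
-- CR = chr(13)
--
-- def _filter_line_endings(in_s):
--     #== Get these from the process data stack (set by the set_tty command) someday!
--     crecho = True
--     lfecho = True
--
--     hold_for_LF = False
--     hold_for_CR = False
--     out_s = ""
--     for c in in_s:
--         if hold_for_LF:
--             hold_for_LF = (c == CR)
--             out_s += (CR+LF)
--             if c not in [CR, LF]:
--                 out_s += c
--             # end if
--         elif hold_for_CR:
--             hold_for_CR = (c == LF)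
--             out_s += (CR+LF)
--             if c not in [CR, LF]:
--                 out_s += c
--             # end if
--         elif c == CR and lfecho:
--             hold_for_LF = True
--         elif c == LF and crecho:
--             hold_for_CR = True
--         else:
--             out_s += c
--         # end if
--     # end for
--     if hold_for_LF or hold_for_CR:
--         out_s += (CR+LF)
--     # end if
--
--     return out_s
-- ===== SOURCE B (Python) =====
-- import re
--
-- LF = chr(10)
-- CR = chr(13)
--
-- def _filter_line_endings(in_s):
--     # Single regex pass: a CR/LF pair (either order) collapses to one CRLF,
--     # a lone CR or LF becomes CRLF; ordered alternation gives leftmost pairing.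
--     return re.sub(r'\r\n|\n\r|\r|\n', CR + LF, in_s)
-- ===== Notes on version B (the rewrite author's own statement) =====
-- stated objective: idiomatic
-- what changed: Replaced the per-character state machine (hold_for_LF/hold_for_CR flags with a trailing flush) by a single regex substitution whose ordered alternation (\r\n|\n\r|\r|\n) pairs adjacent CR/LF and rewrites each match to CRLF; the C regex engine replaces the Python-level loop with string concatenation.
import Mathlib
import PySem

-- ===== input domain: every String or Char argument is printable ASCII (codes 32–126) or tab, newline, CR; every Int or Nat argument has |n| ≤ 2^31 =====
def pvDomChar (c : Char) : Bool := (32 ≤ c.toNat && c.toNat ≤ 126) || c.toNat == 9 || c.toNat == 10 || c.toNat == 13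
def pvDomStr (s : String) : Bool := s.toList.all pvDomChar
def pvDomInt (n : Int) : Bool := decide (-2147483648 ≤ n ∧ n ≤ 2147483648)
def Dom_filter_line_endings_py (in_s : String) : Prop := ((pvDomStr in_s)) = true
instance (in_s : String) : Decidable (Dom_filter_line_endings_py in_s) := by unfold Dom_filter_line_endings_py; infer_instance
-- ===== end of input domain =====

-- B replaces A's per-character hold_for_LF/hold_for_CR state machine by one regex
-- substitution (idiomatic); equivalence of the two traversals is proved below.

-- ===== PORT A =====
-- one iteration of A's for-loop: state is (hold_for_LF, hold_for_CR, out_s)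
def pvAStep (st : Bool × Bool × List Char) (c : Char) : Bool × Bool × List Char :=
  let crecho := true
  let lfecho := true
  let (holdLF, holdCR, out) := st
  if holdLF then
    let holdLF' := c = '\r'
    let out' := out ++ ['\r', '\n']
    let out'' := if ¬ (c = '\r' ∨ c = '\n') then out' ++ [c] else out'
    (holdLF', false, out'')
  else if holdCR then
    let holdCR' := c = '\n'
    let out' := out ++ ['\r', '\n']
    let out'' := if ¬ (c = '\r' ∨ c = '\n') then out' ++ [c] else out'
    (false, holdCR', out'')
  else if c = '\r' ∧ lfecho then
    (true, holdCR, out)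
  else if c = '\n' ∧ crecho then
    (holdLF, true, out)
  else
    (holdLF, holdCR, out ++ [c])

def filter_line_endings_py (in_s : String) : String :=
  let st := in_s.toList.foldl pvAStep (false, false, [])
  let out := if st.1 ∨ st.2.1 then st.2.2 ++ ['\r', '\n'] else st.2.2
  String.mk out

-- ===== PORT B =====
-- hand-port of re.sub(r'\r\n|\n\r|\r|\n', CR+LF, in_s): a left-to-right scan that at
-- each position tries the alternatives in order (two-char pairs first, then lone CR/LF),
-- replaces a match by CRLF and continues after it; exact for this regex on all strings.
def pvBScan : List Char → List Char
  | [] => []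
  | [c] => if c = '\r' ∨ c = '\n' then ['\r', '\n'] else [c]
  | c1 :: c2 :: rest =>
    if (c1 = '\r' ∧ c2 = '\n') ∨ (c1 = '\n' ∧ c2 = '\r') then
      '\r' :: '\n' :: pvBScan rest
    else if c1 = '\r' ∨ c1 = '\n' then
      '\r' :: '\n' :: pvBScan (c2 :: rest)
    else
      c1 :: pvBScan (c2 :: rest)

def filter_line_endings_py_alt (in_s : String) : String :=
  String.mk (pvBScan in_s.toList)

-- ===== PRECONDITION & SPEC =====
def Spec_filter_line_endings_py (in_s : String) (out : String) : Prop := out = filter_line_endings_py_alt in_s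
instance (in_s : String) (out : String) : Decidable (Spec_filter_line_endings_py in_s out) := by unfold Spec_filter_line_endings_py; infer_instance

-- ===== CLAIM (what is proved, stated in full; the proofs are below) =====
def Claim_equal_filter_line_endings_py : Prop := ∀ (in_s : String), Dom_filter_line_endings_py in_s → Spec_filter_line_endings_py in_s (filter_line_endings_py in_s)

-- ===== LEMMAS AND PROOFS =====

-- unfolding equations of B's scan for a head that is / is not part of a pair
theorem pvBScan_other (c : Char) (rest : List Char) (hr : ¬ c = '\r') (hn : ¬ c = '\n') :
    pvBScan (c :: rest) = c :: pvBScan rest := by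
  cases rest <;> simp [pvBScan, hr, hn]

theorem pvBScan_cr (c : Char) (rest : List Char) (hn : ¬ c = '\n') :
    pvBScan ('\r' :: c :: rest) = '\r' :: '\n' :: pvBScan (c :: rest) := by
  simp [pvBScan, hn]

theorem pvBScan_lf (c : Char) (rest : List Char) (hr : ¬ c = '\r') :
    pvBScan ('\n' :: c :: rest) = '\r' :: '\n' :: pvBScan (c :: rest) := by
  simp [pvBScan, hr]

-- finish of A's loop state
def pvFinish (st : Bool × Bool × List Char) : List Char :=
  if st.1 ∨ st.2.1 then st.2.2 ++ ['\r', '\n'] else st.2.2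

-- loop invariant: A's remaining fold from each of its three reachable states equals
-- B's scan of the remaining input (prefixed with the held CR/LF character).
theorem pvInvariant (cs : List Char) : ∀ out : List Char,
    pvFinish (cs.foldl pvAStep (false, false, out)) = out ++ pvBScan cs
  ∧ pvFinish (cs.foldl pvAStep (true, false, out)) = out ++ pvBScan ('\r' :: cs)
  ∧ pvFinish (cs.foldl pvAStep (false, true, out)) = out ++ pvBScan ('\n' :: cs) := by
  induction cs with
  | nil =>
      intro out
      simp [pvFinish, pvBScan]
  | cons c rest ih =>
      intro out
      refine ⟨?_, ?_, ?_⟩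
      · by_cases hr : c = '\r'
        · simpa [pvAStep, hr, pvBScan] using (ih out).2.1
        · by_cases hn : c = '\n'
          · simpa [pvAStep, hr, hn, pvBScan] using (ih out).2.2
          · have := (ih (out ++ [c])).1
            rw [pvBScan_other c rest hr hn]
            simpa [pvAStep, hr, hn] using this
      · by_cases hr : c = '\r'
        · have := (ih (out ++ ['\r', '\n'])).2.1
          simp [pvAStep, hr, pvBScan, this]
        · by_cases hn : c = '\n'
          · have := (ih (out ++ ['\r', '\n'])).1
            simp [pvAStep, hr, hn, pvBScan, this]
          · have := (ih (out ++ ['\r', '\n'] ++ [c])).1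
            rw [pvBScan_cr c rest hn, pvBScan_other c rest hr hn]
            simpa [pvAStep, hr, hn] using this
      · by_cases hn : c = '\n'
        · have := (ih (out ++ ['\r', '\n'])).2.2
          simp [pvAStep, hn, pvBScan, this]
        · by_cases hr : c = '\r'
          · have := (ih (out ++ ['\r', '\n'])).1
            simp [pvAStep, hr, hn, pvBScan, this]
          · have := (ih (out ++ ['\r', '\n'] ++ [c])).1
            rw [pvBScan_lf c rest hr, pvBScan_other c rest hr hn]
            simpa [pvAStep, hr, hn] using this

-- ===== VERDICT (by name: the statement is the Claim_ definition above) =====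
theorem filter_line_endings_py_spec : Claim_equal_filter_line_endings_py := by
  intro in_s _
  show String.mk (pvFinish (in_s.toList.foldl pvAStep (false, false, []))) =
    String.mk (pvBScan in_s.toList)
  exact congrArg String.mk (by simpa using (pvInvariant in_s.toList []).1)
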